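-- pv_equiv track=rewrite | github.com/ffreemt/vizbee | pyvizbee/locate_index_pairs.py | locate_index_pairs
-- ===== SOURCE A (Python) =====
-- from typing import Iterable, List, Tuple, Optional, Union
--
-- def locate_index_pairs(
--     lst: Union[List[int], Iterable]
-- ) -> List[Tuple[Optional[int], Optional[int]]]:
--     """Collect consecutie indices for slice to be used in df[slice()].
--
--     lst: List of integers.
--     """
--     if not lst:
--         return [(None, None)]
--         # [][slice(None, None)] == []
--
--     # just in case lst is not sorted: dedup and sort
--     lst = sorted(set(lst))
--
--     res = []
--
--     buf = lst[0]  # non-decreasing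
--     p0 = buf
--     for _ in lst[1:]:
--         if _ == buf + 1:
--             buf = _
--         else:
--             res.append((p0, buf + 1))
--             buf = _
--             p0 = buf
--
--     # handle the tail: or
--     # res.append((p0, None))
--     res.append((p0, buf + 1))
--
--     return res
-- ===== SOURCE B (Python) =====
-- from typing import Iterable, List, Tuple, Optional, Union
-- from itertools import groupby
--
--
-- def locate_index_pairs(
--     lst: Union[List[int], Iterable]
-- ) -> List[Tuple[Optional[int], Optional[int]]]:
--     """Collect consecutive indices for slice to be used in df[slice()]."""
--     if not lst:
--         return [(None, None)]
--     vals = sorted(set(lst))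
--     res = []
--     for _, grp in groupby(enumerate(vals), key=lambda p: p[1] - p[0]):
--         g = [v for _, v in grp]
--         res.append((g[0], g[-1] + 1))
--     return res
-- ===== Notes on version B (the rewrite author's own statement) =====
-- stated objective: idiomatic
-- what changed: Replaces the running-buffer/accumulator loop over sorted-unique values with itertools.groupby on enumerate keyed by value-minus-index, mapping each maximal consecutive run to (first, last+1).
import Mathlib
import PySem

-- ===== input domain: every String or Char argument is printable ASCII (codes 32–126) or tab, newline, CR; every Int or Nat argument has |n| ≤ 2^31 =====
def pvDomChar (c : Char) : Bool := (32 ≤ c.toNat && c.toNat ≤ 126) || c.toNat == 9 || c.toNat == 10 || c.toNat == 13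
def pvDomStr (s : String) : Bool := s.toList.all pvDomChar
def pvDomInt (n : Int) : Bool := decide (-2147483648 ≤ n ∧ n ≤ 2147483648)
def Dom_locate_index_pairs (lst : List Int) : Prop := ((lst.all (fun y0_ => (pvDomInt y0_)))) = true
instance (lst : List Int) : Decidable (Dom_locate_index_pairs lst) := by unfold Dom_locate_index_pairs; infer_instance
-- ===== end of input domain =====

-- B replaces A's running-buffer loop by grouping enumerate(sorted(set(lst))) on the key
-- value-minus-index (itertools.groupby style); same output, different decomposition.

-- ===== PORT A =====
-- A's for-loop over lst[1:] with state (p0, buf, res); final append of (p0, buf+1).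
def lipLoopA (rest : List Int) (p0 buf : Int) (res : List (Option Int × Option Int)) :
    List (Option Int × Option Int) :=
  match rest with
  | [] => res ++ [(some p0, some (buf + 1))]
  | x :: xs =>
      if x = buf + 1 then lipLoopA xs p0 x res
      else lipLoopA xs x x (res ++ [(some p0, some (buf + 1))])

def locate_index_pairs (lst : List Int) : List (Option Int × Option Int) :=
  if lst = [] then [(none, none)]
  else
    match PySem.List.sorted (PySem.Set.ofList lst) (fun x => x) false with
    | [] => []  -- unreachable: lst ≠ [] so sorted(set(lst)) ≠ []
    | h :: t => lipLoopA t h h []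

-- ===== PORT B =====
-- enumerate(vals) starting at n (Python's enumerate produces int indices)
def lipEnum (n : Int) : List Int → List (Int × Int)
  | [] => []
  | x :: xs => (n, x) :: lipEnum (n + 1) xs

-- the longest prefix of ps whose pairs (i, v) all have key v - i = k, and the remainder
def lipTakeRun (k : Int) (ps : List (Int × Int)) : List (Int × Int) × List (Int × Int) :=
  match ps with
  | [] => ([], [])
  | (i, v) :: rest =>
      if v - i = k then
        let (r, rem) := lipTakeRun k rest
        ((i, v) :: r, rem)
      else ([], ps)

theorem lipTakeRun_snd_length_le (k : Int) (ps : List (Int × Int)) :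
    (lipTakeRun k ps).2.length ≤ ps.length := by
  induction ps with
  | nil => simp [lipTakeRun]
  | cons p rest ih =>
      obtain ⟨i, v⟩ := p
      simp only [lipTakeRun]
      split
      · simpa using Nat.le_succ_of_le ih
      · simp

-- itertools.groupby by the key p.2 - p.1: maximal runs of equal keys
def lipGroups : List (Int × Int) → List (List (Int × Int))
  | [] => []
  | (i, v) :: rest =>
      let pr := lipTakeRun (v - i) rest
      ((i, v) :: pr.1) :: lipGroups pr.2
termination_by ps => ps.length
decreasing_by
  simpa using Nat.lt_succ_of_le (lipTakeRun_snd_length_le (v - i) rest)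

-- per-group result: (g[0], g[-1] + 1)
def lipPair (g : List (Int × Int)) : Option Int × Option Int :=
  (some (g.headD (0, 0)).2, some ((g.getLastD (0, 0)).2 + 1))

def locate_index_pairs_alt (lst : List Int) : List (Option Int × Option Int) :=
  if lst = [] then [(none, none)]
  else
    match PySem.List.sorted (PySem.Set.ofList lst) (fun x => x) false with
    | [] => []  -- unreachable: lst ≠ [] so sorted(set(lst)) ≠ []
    | h :: t => (lipGroups (lipEnum 0 (h :: t))).map lipPair

-- ===== PRECONDITION & SPEC =====
def Spec_locate_index_pairs (lst : List Int) (out : List (Option Int × Option Int)) : Prop := out = locate_index_pairs_alt lst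
instance (lst : List Int) (out : List (Option Int × Option Int)) : Decidable (Spec_locate_index_pairs lst out) := by unfold Spec_locate_index_pairs; infer_instance

-- ===== CLAIM (what is proved, stated in full; the proofs are below) =====
def Claim_equal_locate_index_pairs : Prop := ∀ (lst : List Int), Dom_locate_index_pairs lst → Spec_locate_index_pairs lst (locate_index_pairs lst)

-- ===== LEMMAS AND PROOFS =====

-- last value of the current group: buf if no further pairs were absorbed, else the last absorbed value
def lipLastV (buf : Int) (r : List (Int × Int)) : Int :=
  match r.getLast? with
  | none => buf
  | some (_, v) => v

theorem lipLastV_cons (buf i v : Int) (r : List (Int × Int)) :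
    lipLastV buf ((i, v) :: r) = lipLastV v r := by
  cases r with
  | nil => simp [lipLastV]
  | cons q r' =>
      simp only [lipLastV, List.getLast?_cons_cons]
      cases h : (q :: r').getLast? with
      | none => simp at h
      | some p => rfl

theorem lipPair_cons (i v : Int) (r : List (Int × Int)) :
    lipPair ((i, v) :: r) = (some v, some (lipLastV v r + 1)) := by
  simp only [lipPair, List.headD_cons, List.getLastD_eq_getLast?, List.getLast?_cons,
    Option.getD_some, lipLastV]
  cases h : r.getLast? with
  | none => simp
  | some p => simp

-- Core invariant: inside a run whose next continuing value (at index n) would be buf + 1,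
-- A's loop equals 'close the current group with lipTakeRun, then group the remainder'.
theorem lip_core (t : List Int) :
    ∀ (n p0 buf : Int) (res : List (Option Int × Option Int)),
      lipLoopA t p0 buf res =
        res ++ ((some p0, some (lipLastV buf (lipTakeRun (buf + 1 - n) (lipEnum n t)).1 + 1))
          :: (lipGroups (lipTakeRun (buf + 1 - n) (lipEnum n t)).2).map lipPair) := by
  induction t with
  | nil => intro n p0 buf res; simp [lipLoopA, lipEnum, lipTakeRun, lipLastV, lipGroups]
  | cons x xs ih =>
      intro n p0 buf res
      by_cases hx : x = buf + 1
      · have hkey : x - n = buf + 1 - n := by omega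
        simp only [lipLoopA, if_pos hx, lipEnum, lipTakeRun, hkey]
        rw [ih (n + 1) p0 x res]
        have hq : x + 1 - (n + 1) = buf + 1 - n := by omega
        rw [hq, hx]
        simp [lipLastV_cons]
      · have hkey : ¬ (x - n = buf + 1 - n) := by omega
        simp only [lipLoopA, if_neg hx, lipEnum, lipTakeRun, if_neg hkey]
        rw [ih (n + 1) x x (res ++ [(some p0, some (buf + 1))])]
        have : x + 1 - (n + 1) = x - n := by omega
        rw [this]
        simp only [lipGroups, List.map_cons, lipPair_cons, lipLastV]
        simp

theorem lip_head (h : Int) (t : List Int) :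
    lipLoopA t h h [] = (lipGroups (lipEnum 0 (h :: t))).map lipPair := by
  have hk : h - 0 = h + 1 - 1 := by omega
  simp only [lipEnum, lipGroups, List.map_cons, lipPair_cons, hk]
  have := lip_core t 1 h h []
  simpa using this

-- ===== VERDICT (by name: the statement is the Claim_ definition above) =====
theorem locate_index_pairs_spec : Claim_equal_locate_index_pairs := by
  intro lst _
  unfold Spec_locate_index_pairs locate_index_pairs locate_index_pairs_alt
  by_cases hl : lst = []
  · simp [hl]
  · simp only [if_neg hl]
    cases hs : PySem.List.sorted (PySem.Set.ofList lst) (fun x => x) false with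
    | nil => rfl
    | cons h t => exact lip_head h t
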